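-- pv_equiv track=rewrite | github.com/LeonardoTorresRodrigues/python-experiments | CalculaMultiplos.py | multiplos_de_i_ou_j
-- ===== SOURCE A (Python) =====
-- def multiplos_de_i_ou_j(n, i, j):
--     numeros = []
--     numero = 0
--     while len(numeros) < n:
--         if numero % i == 0 or numero % j == 0:
--             numeros.append(numero)
--         numero += 1
--     return numeros
-- ===== SOURCE B (Python) =====
-- def multiplos_de_i_ou_j(n, i, j):
--     # Merge the two arithmetic progressions of multiples of |i| and |j|
--     # with two pointers; duplicates (common multiples) advance both.
--     ii, jj = abs(i), abs(j)
--     if ii == 0: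
--         ii = jj
--     if jj == 0:
--         jj = ii
--     numeros = []
--     a = b = 0
--     while len(numeros) < n:
--         m = a if a < b else b
--         numeros.append(m)
--         if a == m:
--             a += ii
--         if b == m:
--             b += jj
--     return numeros
-- ===== Notes on version B (the rewrite author's own statement) =====
-- stated objective: faster
-- what changed: Instead of testing every integer 0,1,2,... for divisibility, B merges the two arithmetic progressions of multiples of |i| and |j| with two pointers, advancing both on a common multiple.
import Mathlib
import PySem

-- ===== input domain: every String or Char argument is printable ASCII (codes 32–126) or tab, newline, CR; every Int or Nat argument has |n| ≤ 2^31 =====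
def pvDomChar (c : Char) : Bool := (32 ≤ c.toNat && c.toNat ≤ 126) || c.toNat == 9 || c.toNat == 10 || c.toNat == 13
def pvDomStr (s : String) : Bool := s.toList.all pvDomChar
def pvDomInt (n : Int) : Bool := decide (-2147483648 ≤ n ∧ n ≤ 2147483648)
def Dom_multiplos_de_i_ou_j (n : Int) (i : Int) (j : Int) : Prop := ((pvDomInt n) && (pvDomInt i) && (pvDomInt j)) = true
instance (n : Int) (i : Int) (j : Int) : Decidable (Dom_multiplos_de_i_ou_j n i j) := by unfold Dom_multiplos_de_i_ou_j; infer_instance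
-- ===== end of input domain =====

-- B merges the two arithmetic progressions of multiples of |i| and |j| with two
-- pointers (O(n)) instead of testing every integer 0,1,2,... for divisibility.


-- ===== PORT A =====
-- the while loop; the fuel argument only makes the recursion total (inside
-- Pre_ the fuel chosen below is proved sufficient, see lemma loopA_eq_loopB)
def pvLoopA (n i j : Int) : Nat → List Int → Int → List Int
  | 0, numeros, _ => numeros
  | fuel+1, numeros, numero =>
    if (numeros.length : Int) < n then
      if (PySem.Int.mod numero i == 0) || (PySem.Int.mod numero j == 0) then
        pvLoopA n i j fuel (numeros ++ [numero]) (numero + 1)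
      else
        pvLoopA n i j fuel numeros (numero + 1)
    else numeros

def multiplos_de_i_ou_j (n : Int) (i : Int) (j : Int) : List Int :=
  pvLoopA n i j (n.toNat * (i.natAbs + j.natAbs + 1) + 1) [] 0

-- ===== PORT B =====
-- the while loop of Source B: runs while len(numeros) < n, i.e. exactly
-- (n - len) more iterations since every iteration appends one element
def pvLoopB (ii jj : Int) : Nat → Int → Int → List Int
  | 0, _, _ => []
  | k+1, a, b =>
    let m := if a < b then a else b
    m :: pvLoopB ii jj k (if a = m then a + ii else a) (if b = m then b + jj else b)

def multiplos_de_i_ou_j_alt (n : Int) (i : Int) (j : Int) : List Int :=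
  let ii : Int := |i|
  let jj : Int := |j|
  let ii := if ii = 0 then jj else ii
  let jj := if jj = 0 then ii else jj
  pvLoopB ii jj n.toNat 0 0

-- ===== PRECONDITION & SPEC =====
-- Pre_ excludes exactly the inputs where Python A raises ZeroDivisionError:
-- with n ≥ 1 the loop runs, so i = 0 raises at numero = 0, and j = 0 raises at
-- the first numero not divisible by i (which exists unless |i| = 1).
def Pre_multiplos_de_i_ou_j (n : Int) (i : Int) (j : Int) : Prop :=
  n ≤ 0 ∨ (i ≠ 0 ∧ (j ≠ 0 ∨ i = 1 ∨ i = -1))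
instance (n : Int) (i : Int) (j : Int) : Decidable (Pre_multiplos_de_i_ou_j n i j) := by unfold Pre_multiplos_de_i_ou_j; infer_instance
def pvWitness_multiplos_de_i_ou_j : Int × Int × Int := (5, 2, 3)

def Spec_multiplos_de_i_ou_j (n : Int) (i : Int) (j : Int) (out : List Int) : Prop := out = multiplos_de_i_ou_j_alt n i j
instance (n : Int) (i : Int) (j : Int) (out : List Int) : Decidable (Spec_multiplos_de_i_ou_j n i j out) := by unfold Spec_multiplos_de_i_ou_j; infer_instance

-- ===== CLAIM (what is proved, stated in full; the proofs are below) =====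
def Claim_equal_multiplos_de_i_ou_j : Prop := ∀ (n : Int) (i : Int) (j : Int), Dom_multiplos_de_i_ou_j n i j → Pre_multiplos_de_i_ou_j n i j → Spec_multiplos_de_i_ou_j n i j (multiplos_de_i_ou_j n i j)

-- ===== LEMMAS AND PROOFS =====

-- Invariant: a (resp. b) is the least multiple of ii (resp. jj) that is ≥ numero.
-- Then A's test "numero divisible by i or j" holds iff numero = min a b, and the
-- two loops emit the same elements in lockstep.
lemma loopA_eq_loopB (n i j ii jj : Int)
    (hii : 1 ≤ ii) (hjj : 1 ≤ jj)
    (hcond : ∀ x : Int,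
      ((PySem.Int.mod x i == 0) || (PySem.Int.mod x j == 0)) =
      (decide (ii ∣ x) || decide (jj ∣ x))) :
    ∀ (fuel k : Nat) (numeros : List Int) (numero a b : Int),
    ii ∣ a → numero ≤ a → a < numero + ii →
    jj ∣ b → numero ≤ b → b < numero + jj →
    (numeros.length : Int) + k = n →
    1 + k * ii.toNat + (a - numero).toNat ≤ fuel →
    pvLoopA n i j fuel numeros numero = numeros ++ pvLoopB ii jj k a b := by
  intro fuel
  induction fuel with
  | zero => intro k numeros numero a b _ _ _ _ _ _ _ hf; omega
  | succ fuel ih =>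
    intro k numeros numero a b hda hna hai hdb hnb hbj hlen hf
    cases k with
    | zero =>
      have : ¬ ((numeros.length : Int) < n) := by omega
      simp [pvLoopA, this, pvLoopB]
    | succ s =>
      have hlt : (numeros.length : Int) < n := by omega
      -- characterize the divisibility test via the invariant
      have haiff : ii ∣ numero ↔ a = numero := by
        constructor
        · intro h
          by_contra hne
          have h1 : numero < a := lt_of_le_of_ne hna (fun e => hne e.symm)
          have h2 : ii ∣ (a - numero) := dvd_sub hda h
          have h3 : ii ≤ a - numero := Int.le_of_dvd (by omega) h2
          omega
        · intro h; rw [← h] at *; exact hda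
      have hbiff : jj ∣ numero ↔ b = numero := by
        constructor
        · intro h
          by_contra hne
          have h1 : numero < b := lt_of_le_of_ne hnb (fun e => hne e.symm)
          have h2 : jj ∣ (b - numero) := dvd_sub hdb h
          have h3 : jj ≤ b - numero := Int.le_of_dvd (by omega) h2
          omega
        · intro h; rw [← h] at *; exact hdb
      by_cases hdiv : ii ∣ numero ∨ jj ∣ numero
      · -- append step
        have htest : ((PySem.Int.mod numero i == 0) || (PySem.Int.mod numero j == 0)) = true := by
          rw [hcond]; simp only [Bool.or_eq_true, decide_eq_true_eq]; exact hdiv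
        have hm : (if a < b then a else b) = numero := by
          rcases hdiv with h | h
          · have ha := haiff.mp h
            split <;> omega
          · have hb := hbiff.mp h
            split <;> omega
        have step : pvLoopA n i j (fuel+1) numeros numero =
            pvLoopA n i j fuel (numeros ++ [numero]) (numero + 1) := by
          simp [pvLoopA, hlt, htest]
        rw [step]
        have hB : pvLoopB ii jj (s+1) a b =
            numero :: pvLoopB ii jj s (if a = numero then a + ii else a) (if b = numero then b + jj else b) := by
          simp only [pvLoopB, hm]
        rw [hB]
        have := ih s (numeros ++ [numero]) (numero + 1)
          (if a = numero then a + ii else a) (if b = numero then b + jj else b)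
          (by split <;> [exact dvd_add hda dvd_rfl; exact hda])
          (by split <;> omega)
          (by split <;> omega)
          (by split <;> [exact dvd_add hdb dvd_rfl; exact hdb])
          (by split <;> omega)
          (by split <;> omega)
          (by simp; omega)
          (by
            have hmul : (s+1) * ii.toNat = s * ii.toNat + ii.toNat := Nat.succ_mul _ _
            rw [hm] at *
            split <;> omega)
        rw [this]; simp
      · -- skip step
        push Not at hdiv
        have htest : ((PySem.Int.mod numero i == 0) || (PySem.Int.mod numero j == 0)) = false := by
          rw [hcond]; simp only [Bool.or_eq_false_iff, decide_eq_false_iff_not]; exact hdiv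
        have hane : a ≠ numero := fun e => hdiv.1 (haiff.mpr e)
        have hbne : b ≠ numero := fun e => hdiv.2 (hbiff.mpr e)
        have step : pvLoopA n i j (fuel+1) numeros numero =
            pvLoopA n i j fuel numeros (numero + 1) := by
          simp [pvLoopA, hlt, htest]
        rw [step]
        exact ih (s+1) numeros (numero + 1) a b hda (by omega) (by omega)
          hdb (by omega) (by omega) hlen (by omega)

theorem multiplos_de_i_ou_j_spec : Claim_equal_multiplos_de_i_ou_j := by
  intro n i j _ hpre
  unfold Spec_multiplos_de_i_ou_j
  by_cases hn : n ≤ 0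
  · have h0 : n.toNat = 0 := by omega
    have : ¬ ((0:Int) < n) := by omega
    simp [multiplos_de_i_ou_j, multiplos_de_i_ou_j_alt, h0,
      Nat.zero_mul, pvLoopA, pvLoopB, this]
  · push Not at hn
    rcases hpre with h | ⟨hi, hj⟩
    · omega
    · -- the alt's local values of ii and jj
      set ii : Int := if |i| = 0 then |j| else |i| with hiidef
      set jj : Int := if |j| = 0 then ii else |j| with hjjdef
      have hii0 : ii = |i| := by
        rw [hiidef]; rw [if_neg]; simp [abs_eq_zero]; exact hi
      have hii : 1 ≤ ii := by rw [hii0]; rcases abs_pos.mpr hi with h; omega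
      have hjj : 1 ≤ jj := by
        rw [hjjdef]
        by_cases h : |j| = 0
        · rw [if_pos h]; exact hii
        · rw [if_neg h]; have := abs_nonneg j; omega
      have hcond : ∀ x : Int,
          ((PySem.Int.mod x i == 0) || (PySem.Int.mod x j == 0)) =
          (decide (ii ∣ x) || decide (jj ∣ x)) := by
        intro x
        rcases hj with hjne | hone
        · have hjj0 : jj = |j| := by
            rw [hjjdef, if_neg]; simp [abs_eq_zero]; exact hjne
          have e1 : (PySem.Int.mod x i == 0) = decide (i ∣ x) := by
            by_cases h : i ∣ x <;> simp [PySem.Int.mod_eq_zero_iff_dvd, h]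
          have e2 : (PySem.Int.mod x j == 0) = decide (j ∣ x) := by
            by_cases h : j ∣ x <;> simp [PySem.Int.mod_eq_zero_iff_dvd, h]
          rw [e1, e2, hii0, hjj0]
          simp [abs_dvd]
        · have h1 : ii = 1 := by
            rw [hii0]; rcases hone with h | h <;> simp [h]
          have hidvd : i ∣ x := by rcases hone with h | h <;> simp [h]
          have : PySem.Int.mod x i = 0 := (PySem.Int.mod_eq_zero_iff_dvd x i).mpr hidvd
          simp [this, h1]
      have main := loopA_eq_loopB n i j ii jj hii hjj hcond
        (n.toNat * (i.natAbs + j.natAbs + 1) + 1) n.toNat [] 0 0 0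
        (dvd_zero ii) le_rfl (by omega) (dvd_zero jj) le_rfl (by omega)
        (by simp; omega)
        (by
          have h1 : ii.toNat = i.natAbs := by rw [hii0, Int.abs_eq_natAbs, Int.toNat_natCast]
          have h2 : n.toNat * i.natAbs ≤ n.toNat * (i.natAbs + j.natAbs + 1) :=
            Nat.mul_le_mul_left _ (by omega)
          simp only [h1]; omega)
      have hA : multiplos_de_i_ou_j n i j = [] ++ pvLoopB ii jj n.toNat 0 0 := main
      have halt : multiplos_de_i_ou_j_alt n i j = pvLoopB ii jj n.toNat 0 0 := rfl
      rw [hA, halt, List.nil_append]
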